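-- pv_equiv track=rewrite | github.com/ketkat001/SWEA | D3/SW1220.py | magnetic
-- ===== SOURCE A (Python) =====
-- def magnetic(ln, n):
--     cnt = 0
--     for y in range(ln):
--         check = 0
--         for x in range(ln):
--             if n[x][y] == 0:
--                 continue
--             elif n[x][y] == 1:
--                 check = 1
--             elif check == 0 and n[x][y] == 2:
--                 continue
--             elif check == 1 and n[x][y] == 2:
--                 cnt += 1
--                 check = 0
--     return cnt
-- ===== SOURCE B (Python) =====
-- def magnetic(ln, n):
--     total = 0
--     for y in range(ln):
--         col = [row[y] for row in n[:ln] if row[y] in (1, 2)]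
--         total += sum(1 for a, b in zip(col, col[1:]) if a == 1 and b == 2)
--     return total
-- ===== Notes on version B (the rewrite author's own statement) =====
-- stated objective: simpler
-- what changed: Replaces the per-cell check/cnt scalar state machine with a filter-then-pairwise pass: each column is reduced to its cells equal to 1 or 2 and collisions are counted as adjacent (1,2) pairs via zip.
import Mathlib
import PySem

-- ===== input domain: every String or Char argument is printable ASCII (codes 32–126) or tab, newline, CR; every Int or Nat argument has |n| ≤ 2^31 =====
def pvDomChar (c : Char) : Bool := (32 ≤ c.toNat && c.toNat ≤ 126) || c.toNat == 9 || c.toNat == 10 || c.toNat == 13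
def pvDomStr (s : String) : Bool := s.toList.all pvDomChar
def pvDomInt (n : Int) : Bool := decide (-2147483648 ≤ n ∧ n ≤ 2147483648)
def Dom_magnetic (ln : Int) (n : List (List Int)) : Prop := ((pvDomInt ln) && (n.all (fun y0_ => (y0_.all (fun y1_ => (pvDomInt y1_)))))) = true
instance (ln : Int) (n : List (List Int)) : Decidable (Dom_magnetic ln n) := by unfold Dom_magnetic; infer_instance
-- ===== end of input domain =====

-- B replaces A's per-cell check/cnt state machine by filtering each column to its 1/2 cells
-- and counting adjacent (1,2) pairs with zip (objective: simpler).


-- ===== PORT A =====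
def magnetic (ln : Int) (n : List (List Int)) : Int :=
  ((PySem.List.pyRange 0 ln 1).foldl (fun cnt y =>
    ((PySem.List.pyRange 0 ln 1).foldl (fun (p : Int × Int) x =>
      let v := PySem.List.pyGetD (PySem.List.pyGetD n x []) y 0
      if v = 0 then p
      else if v = 1 then (p.1, 1)
      else if p.2 = 0 ∧ v = 2 then p
      else if p.2 = 1 ∧ v = 2 then (p.1 + 1, 0)
      else p) (cnt, 0)).1) 0)

-- ===== PORT B =====
def magnetic_alt (ln : Int) (n : List (List Int)) : Int :=
  (PySem.List.pyRange 0 ln 1).foldl (fun total y =>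
    let col := ((PySem.List.slice n none (some ln)).filter
        (fun row => decide (PySem.List.pyGetD row y 0 = 1 ∨ PySem.List.pyGetD row y 0 = 2))).map
        (fun row => PySem.List.pyGetD row y 0)
    total + ((col.zip col.tail).foldl (fun t ab => if ab.1 = 1 ∧ ab.2 = 2 then t + 1 else t) 0)) 0

-- ===== PRECONDITION & SPEC =====
-- Pre_ excludes exactly the inputs where Python A raises IndexError: a positive ln larger
-- than the grid, or a row among the first ln rows shorter than ln (then n[x][y] raises).
def Pre_magnetic (ln : Int) (n : List (List Int)) : Prop :=
  ln ≤ 0 ∨ (ln ≤ (n.length : Int) ∧ ∀ row ∈ n.take ln.toNat, ln ≤ (row.length : Int))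
instance (ln : Int) (n : List (List Int)) : Decidable (Pre_magnetic ln n) := by unfold Pre_magnetic; infer_instance
def pvWitness_magnetic : Int × List (List Int) := (2, [[1, 0], [2, 2]])

def Spec_magnetic (ln : Int) (n : List (List Int)) (out : Int) : Prop := out = magnetic_alt ln n
instance (ln : Int) (n : List (List Int)) (out : Int) : Decidable (Spec_magnetic ln n out) := by unfold Spec_magnetic; infer_instance

-- ===== CLAIM (what is proved, stated in full; the proofs are below) =====
def Claim_equal_magnetic : Prop := ∀ (ln : Int) (n : List (List Int)), Dom_magnetic ln n → Pre_magnetic ln n → Spec_magnetic ln n (magnetic ln n)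

-- ===== LEMMAS AND PROOFS =====

-- A's inner-loop step, on the cell value.
def pvStepA (p : Int × Int) (v : Int) : Int × Int :=
  if v = 0 then p
  else if v = 1 then (p.1, 1)
  else if p.2 = 0 ∧ v = 2 then p
  else if p.2 = 1 ∧ v = 2 then (p.1 + 1, 0)
  else p

-- adjacency count with previous value c
def pvPc (c : Int) : List Int → Int
  | [] => 0
  | v :: t => (if c = 1 ∧ v = 2 then 1 else 0) + pvPc v t

theorem pvStepA_skip (p : Int × Int) (v : Int) (h1 : v ≠ 1) (h2 : v ≠ 2) :
    pvStepA p v = p := by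
  simp [pvStepA, h1, h2]

theorem pvFoldA_filter (vs : List Int) (p : Int × Int) :
    vs.foldl pvStepA p = (vs.filter (fun v => decide (v = 1 ∨ v = 2))).foldl pvStepA p := by
  induction vs generalizing p with
  | nil => rfl
  | cons v t ih =>
    by_cases h1 : v = 1
    · simp [List.foldl_cons, h1, ih]
    · by_cases h2 : v = 2
      · simp [List.foldl_cons, h2, ih]
      · simp [List.foldl_cons, h1, h2, pvStepA_skip p v h1 h2, ih]

theorem pvPc_indep (c c' : Int) (l : List Int) (hc : c ≠ 1) (hc' : c' ≠ 1) :
    pvPc c l = pvPc c' l := by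
  cases l with
  | nil => rfl
  | cons v t => simp [pvPc, hc, hc']

theorem pvFoldA_pc (fs : List Int) (cnt check : Int)
    (hfs : ∀ v ∈ fs, v = 1 ∨ v = 2) (hck : check = 0 ∨ check = 1) :
    (fs.foldl pvStepA (cnt, check)).1 = cnt + pvPc check fs := by
  induction fs generalizing cnt check with
  | nil => simp [pvPc]
  | cons v t ih =>
    have hv := hfs v (by simp)
    have ht : ∀ v ∈ t, v = 1 ∨ v = 2 := fun w hw => hfs w (by simp [hw])
    rcases hv with hv | hv
    · subst hv
      have : pvStepA (cnt, check) 1 = (cnt, 1) := by simp [pvStepA]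
      rw [List.foldl_cons, this, ih cnt 1 ht (Or.inr rfl)]
      simp [pvPc]
    · subst hv
      rcases hck with hck | hck
      · subst hck
        have : pvStepA (cnt, (0 : Int)) 2 = (cnt, 0) := by simp [pvStepA]
        rw [List.foldl_cons, this, ih cnt 0 ht (Or.inl rfl)]
        simp [pvPc, pvPc_indep 0 2 t (by norm_num) (by norm_num)]
      · subst hck
        have : pvStepA (cnt, (1 : Int)) 2 = (cnt + 1, 0) := by simp [pvStepA]
        rw [List.foldl_cons, this, ih (cnt + 1) 0 ht (Or.inl rfl)]
        simp [pvPc, pvPc_indep 0 2 t (by norm_num) (by norm_num)]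
        ring

theorem pvZfold_shift (l : List (Int × Int)) (c s : Int) :
    l.foldl (fun t ab => if ab.1 = 1 ∧ ab.2 = 2 then t + 1 else t) (c + s)
      = c + l.foldl (fun t ab => if ab.1 = 1 ∧ ab.2 = 2 then t + 1 else t) s := by
  induction l generalizing s with
  | nil => rfl
  | cons ab l' ih =>
    by_cases h : ab.1 = 1 ∧ ab.2 = 2
    · simp only [List.foldl_cons, h, if_pos, and_self]
      rw [add_assoc, ih]
    · simp only [List.foldl_cons, if_neg h, ih]

theorem pvPc_zip (a : Int) (t : List Int) :
    pvPc a t = (((a :: t).zip t).foldl (fun s ab => if ab.1 = 1 ∧ ab.2 = 2 then s + 1 else s) 0) := by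
  induction t generalizing a with
  | nil => rfl
  | cons b t' ih =>
    have hz : ((a :: b :: t').zip (b :: t')) = (a, b) :: ((b :: t').zip t') := rfl
    rw [pvPc, ih b, hz, List.foldl_cons]
    by_cases h : a = 1 ∧ b = 2
    · have h1 : (if (a, b).1 = 1 ∧ (a, b).2 = 2 then (0 : Int) + 1 else 0) = 1 + 0 := by simp [h]
      rw [h1, pvZfold_shift]
      simp [h]
    · have h1 : (if (a, b).1 = 1 ∧ (a, b).2 = 2 then (0 : Int) + 1 else 0) = 0 := by simp [h]
      rw [h1]
      simp [h]

theorem pvRange_map_getD (xs : List (List Int)) (k : Nat) (hk : k ≤ xs.length) :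
    (PySem.List.pyRange 0 (k : Int) 1).map (fun x => PySem.List.pyGetD xs x []) = xs.take k := by
  induction k with
  | zero => simp [PySem.List.pyRange_one_eq_nil]
  | succ m ih =>
    have hm : m < xs.length := by omega
    have hc : ((m + 1 : Nat) : Int) = (m : Int) + 1 := by push_cast; ring
    rw [hc, PySem.List.pyRange_one_succ_right (by omega), List.map_append,
      ih (by omega), List.take_add_one]
    simp [PySem.List.pyGetD_natCast, List.getD, List.getElem?_eq_getElem hm]

-- ===== VERDICT (by name: the statement is the Claim_ definition above) =====
theorem magnetic_spec : Claim_equal_magnetic := by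
  intro ln n _hdom hpre
  unfold Spec_magnetic magnetic magnetic_alt
  by_cases hln : ln ≤ 0
  · rw [PySem.List.pyRange_one_eq_nil hln]
    rfl
  · rcases hpre with h | ⟨hlen, _hrows⟩
    · omega
    apply PySem.List.foldl_congr_mem
    intro cnt y _hy
    -- inner fold over x reading n[x][y] = fold of pvStepA over the column values
    have hfold : ((PySem.List.pyRange 0 ln 1).foldl (fun (p : Int × Int) x =>
        let v := PySem.List.pyGetD (PySem.List.pyGetD n x []) y 0
        if v = 0 then p
        else if v = 1 then (p.1, 1)
        else if p.2 = 0 ∧ v = 2 then p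
        else if p.2 = 1 ∧ v = 2 then (p.1 + 1, 0)
        else p) (cnt, 0)) =
        (((PySem.List.pyRange 0 ln 1).map (fun x => PySem.List.pyGetD (PySem.List.pyGetD n x []) y 0)).foldl pvStepA (cnt, 0)) := by
      rw [List.foldl_map]
      rfl
    have hcol : (PySem.List.pyRange 0 ln 1).map (fun x => PySem.List.pyGetD (PySem.List.pyGetD n x []) y 0)
        = (n.take ln.toNat).map (fun row => PySem.List.pyGetD row y 0) := by
      have h1 : (PySem.List.pyRange 0 ln 1).map (fun x => PySem.List.pyGetD n x []) = n.take ln.toNat := by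
        have := pvRange_map_getD n ln.toNat (by omega)
        rwa [Int.toNat_of_nonneg (by omega)] at this
      rw [← h1, List.map_map]
      rfl
    have hslice : PySem.List.slice n none (some ln) = n.take ln.toNat :=
      PySem.List.slice_to n (by omega)
    rw [hfold, hcol, hslice]
    set f : List Int → Int := fun row => PySem.List.pyGetD row y 0 with hf
    set keep : Int → Bool := fun v => decide (v = 1 ∨ v = 2) with hkeep
    have hfm : ((n.take ln.toNat).map f).filter keep
        = ((n.take ln.toNat).filter (fun row => keep (f row))).map f := by
      rw [List.filter_map]
      rfl
    set col := ((n.take ln.toNat).filter (fun row => keep (f row))).map f with hcolb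
    rw [pvFoldA_filter, hfm]
    have hall : ∀ v ∈ col, v = 1 ∨ v = 2 := by
      intro v hv
      rcases List.mem_map.1 hv with ⟨row, hrow, hfr⟩
      have := List.of_mem_filter hrow
      simpa [hkeep, hfr] using this
    rw [pvFoldA_pc col cnt 0 hall (Or.inl rfl)]
    cases col with
    | nil => simp [pvPc]
    | cons a t =>
      have := pvPc_zip a t
      simp only [pvPc] at this ⊢
      simp only [List.tail_cons]
      omega
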